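-- pv_equiv track=rewrite | github.com/jzohdi/2048_solver | PlayerAI_3B.py | moveUD
-- ===== SOURCE A (Python) =====
-- def moveUD(down, grid):
--     r = range(4 - 1, -1, -1) if down else range(4)
--
--     moved = False
--
--     for j in range(4):
--         cells = []
--         for i in r:
--             cell = grid[i][j]
--
--             if cell != 0:
--                 cells.append(cell)
--         merge(cells)
--
--         for i in r:
--             value = cells.pop(0) if cells else 0
--             if grid[i][j] != value:
--                 moved = True
--             grid[i][j] = value
--
--     return (moved, grid)
--
-- def merge(cells):
--     if len(cells) <= 1:
--         return cells
--     i = 0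
--     while i < len(cells) - 1:
--         if cells[i] == cells[i+1]:
--             cells[i] *= 2
--
--             del cells[i+1]
--         i += 1
-- ===== SOURCE B (Python) =====
-- def moveUD(down, grid):
--     rows = range(3, -1, -1) if down else range(4)
--     moved = False
--     for j in range(4):
--         out = []
--         just_merged = False
--         for i in rows:
--             v = grid[i][j]
--             if v == 0:
--                 continue
--             if out and not just_merged and out[-1] == v:
--                 out[-1] = 2 * v
--                 just_merged = True
--             else:
--                 out.append(v)
--                 just_merged = False
--         out += [0] * (4 - len(out))
--         for i, v in zip(rows, out):
--             if grid[i][j] != v: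
--                 moved = True
--             grid[i][j] = v
--     return (moved, grid)
-- ===== Notes on version B (the rewrite author's own statement) =====
-- stated objective: simpler
-- what changed: A collects each column's nonzeros, merges them with a separate helper that repeatedly doubles and deletes inside a del-based while loop, then writes back by popping; B does one left-to-right scan per column with a last-value/just-merged flag that builds the merged column directly and writes it back zipped with the row order, with no merge helper and no in-list deletion.
import Mathlib
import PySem

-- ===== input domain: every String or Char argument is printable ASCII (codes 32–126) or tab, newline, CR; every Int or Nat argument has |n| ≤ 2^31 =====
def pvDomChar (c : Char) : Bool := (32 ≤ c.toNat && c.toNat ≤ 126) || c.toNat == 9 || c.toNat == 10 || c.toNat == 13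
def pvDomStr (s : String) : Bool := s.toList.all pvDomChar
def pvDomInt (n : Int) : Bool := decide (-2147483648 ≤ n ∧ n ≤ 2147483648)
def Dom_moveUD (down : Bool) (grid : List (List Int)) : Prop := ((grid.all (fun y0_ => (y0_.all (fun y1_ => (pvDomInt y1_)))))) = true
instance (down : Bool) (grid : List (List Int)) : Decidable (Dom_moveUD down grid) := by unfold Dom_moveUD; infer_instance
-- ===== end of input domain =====

-- B replaces A's collect-then-merge-helper (a del-based while loop) by a single left-to-right
-- scan per column with a "just merged" flag (objective: simpler).  Python A and B both mutate
-- `grid` in place and return it; the equivalence proved here is about the returned value.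

-- ===== PORT A =====

-- grid[i][j]; the defaults are reached only outside Pre_moveUD, where the Python raises IndexError
def getCell (g : List (List Int)) (i j : Int) : Int :=
  PySem.List.pyGetD (PySem.List.pyGetD g i []) j 0

-- grid[i][j] = v; i, j always come from range(4) / range(3,-1,-1) here, so they are
-- nonnegative and `toNat` is exact (Python's negative-index wrap is never exercised)
def setCell (g : List (List Int)) (i j : Int) (v : Int) : List (List Int) :=
  g.modify i.toNat (fun row => row.set j.toNat v)

-- the while loop of merge(cells); i is the loop index, always in range while the loop runs
def mergeLoop (cells : List Int) (i : Nat) : List Int :=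
  if _h : i < cells.length - 1 then
    if cells.getD i 0 = cells.getD (i + 1) 0 then
      -- cells[i] *= 2; del cells[i+1]
      mergeLoop ((cells.set i (cells.getD i 0 * 2)).eraseIdx (i + 1)) (i + 1)
    else
      mergeLoop cells (i + 1)
  else cells
  termination_by cells.length - i
  decreasing_by
    · simp only [List.length_eraseIdx, List.length_set]
      split <;> omega
    · omega

-- merge(cells): early return for len <= 1, else the while loop from i = 0
def mergeA (cells : List Int) : List Int :=
  if cells.length ≤ 1 then cells else mergeLoop cells 0

-- body of `for i in r: cell = grid[i][j]; if cell != 0: cells.append(cell)`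
def collectStep (g : List (List Int)) (j : Int) (acc : List Int) (i : Int) : List Int :=
  let cell := getCell g i j
  if cell ≠ 0 then acc ++ [cell] else acc

-- body of A's write-back loop: value = cells.pop(0) if cells else 0; compare; assign
def popWriteStep (j : Int) (s : List Int × Bool × List (List Int)) (i : Int) :
    List Int × Bool × List (List Int) :=
  let value := match s.1 with | [] => (0 : Int) | c :: _ => c
  (s.1.tail, (if getCell s.2.2 i j ≠ value then true else s.2.1), setCell s.2.2 i j value)

-- one iteration of A's `for j in range(4)` (st.2 is the grid entering the column)
def colA (r : List Int) (st : Bool × List (List Int)) (j : Int) : Bool × List (List Int) :=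
  let cells := mergeA (r.foldl (collectStep st.2 j) [])
  (r.foldl (popWriteStep j) (cells, st)).2

def moveUD (down : Bool) (grid : List (List Int)) : Bool × List (List Int) :=
  let r := if down then PySem.List.pyRange (4 - 1) (-1) (-1) else PySem.List.pyRange 0 4 1
  (PySem.List.pyRange 0 4 1).foldl (colA r) (false, grid)

-- ===== PORT B =====

-- one step of B's single scan; `out` is kept in REVERSE order (its head is Python's out[-1],
-- out[-1] = 2*v is a head replacement, append is cons); s.2 is the just_merged flag
def scanStep (s : List Int × Bool) (v : Int) : List Int × Bool :=
  if v = 0 then s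
  else if s.1 ≠ [] ∧ s.2 = false ∧ s.1.headD 0 = v then (2 * v :: s.1.tail, true)
  else (v :: s.1, false)

-- body of `for i, v in zip(rows, out): ...`
def zipWriteStep (j : Int) (s : Bool × List (List Int)) (iv : Int × Int) :
    Bool × List (List Int) :=
  ((if getCell s.2 iv.1 j ≠ iv.2 then true else s.1), setCell s.2 iv.1 j iv.2)

-- one iteration of B's `for j in range(4)`
def colB (rows : List Int) (st : Bool × List (List Int)) (j : Int) : Bool × List (List Int) :=
  let s := rows.foldl (fun s i => scanStep s (getCell st.2 i j)) ([], false)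
  let out := s.1.reverse
  (rows.zip (out ++ List.replicate (4 - out.length) 0)).foldl (zipWriteStep j) st

def moveUD_alt (down : Bool) (grid : List (List Int)) : Bool × List (List Int) :=
  let rows := if down then PySem.List.pyRange 3 (-1) (-1) else PySem.List.pyRange 0 4 1
  (PySem.List.pyRange 0 4 1).foldl (colB rows) (false, grid)

-- ===== PRECONDITION & SPEC =====
-- Python A raises IndexError at grid[i][j] unless the grid has at least 4 rows whose first 4
-- each have at least 4 entries; Pre_ is exactly the inputs on which A returns normally.
def Pre_moveUD (down : Bool) (grid : List (List Int)) : Prop :=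
  4 ≤ grid.length ∧ ∀ row ∈ grid.take 4, 4 ≤ row.length
instance (down : Bool) (grid : List (List Int)) : Decidable (Pre_moveUD down grid) := by
  unfold Pre_moveUD; infer_instance

def pvWitness_moveUD : Bool × List (List Int) :=
  (false, [[2, 2, 0, 0], [0, 0, 0, 0], [4, 0, 0, 0], [4, 0, 0, 2]])

def Spec_moveUD (down : Bool) (grid : List (List Int)) (out : Bool × List (List Int)) : Prop := out = moveUD_alt down grid
instance (down : Bool) (grid : List (List Int)) (out : Bool × List (List Int)) : Decidable (Spec_moveUD down grid out) := by unfold Spec_moveUD; infer_instance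

-- ===== CLAIM (what is proved, stated in full; the proofs are below) =====
def Claim_equal_moveUD : Prop := ∀ (down : Bool) (grid : List (List Int)), Dom_moveUD down grid → Pre_moveUD down grid → Spec_moveUD down grid (moveUD down grid)

-- ===== LEMMAS AND PROOFS =====

-- the merged column both programs compute: greedy left-to-right pairing with no re-merge
def greedy : List Int → List Int
  | [] => []
  | [a] => [a]
  | a :: b :: t => if a = b then 2 * a :: greedy t else a :: greedy (b :: t)

lemma getD_append_len (p : List Int) (a : Int) (l : List Int) (d : Int) :
    (p ++ a :: l).getD p.length d = a := by
  simp [List.getD]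

lemma set_append_len (p : List Int) (a v : Int) (l : List Int) :
    (p ++ a :: l).set p.length v = p ++ v :: l := by
  induction p with
  | nil => simp
  | cons x xs ih => simp [ih]

lemma eraseIdx_append_len (p : List Int) (b : Int) (t : List Int) :
    (p ++ b :: t).eraseIdx p.length = p ++ t := by
  induction p with
  | nil => simp
  | cons x xs ih => simp [ih]

-- invariant of A's while loop: the first `done.length` entries are final, the rest get greedy-merged
lemma mergeLoop_spec : ∀ (rest done : List Int),
    mergeLoop (done ++ rest) done.length = done ++ greedy rest := by
  intro rest
  induction rest using greedy.induct with
  | case1 =>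
    intro done
    rw [mergeLoop]
    simp [greedy]
  | case2 a =>
    intro done
    rw [mergeLoop]
    simp [greedy]
  | case3 b t ih =>
    intro done
    have h2 : (done ++ b :: b :: t).getD (done.length + 1) 0 = b := by
      simpa using getD_append_len (done ++ [b]) b t 0
    have he : ((done ++ b :: b :: t).set done.length (b * 2)).eraseIdx (done.length + 1)
        = (done ++ [b * 2]) ++ t := by
      rw [set_append_len]
      simpa using eraseIdx_append_len (done ++ [b * 2]) b t
    rw [mergeLoop, dif_pos (by simp)]
    rw [getD_append_len, h2, if_pos rfl, he]
    have hl : done.length + 1 = (done ++ [b * 2]).length := by simp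
    rw [hl, ih]
    simp [greedy, mul_comm]
  | case4 a b t hab ih =>
    intro done
    have h2 : (done ++ a :: b :: t).getD (done.length + 1) 0 = b := by
      simpa using getD_append_len (done ++ [a]) b t 0
    rw [mergeLoop, dif_pos (by simp)]
    rw [getD_append_len, h2, if_neg hab]
    have hl : done.length + 1 = (done ++ [a]).length := by simp
    have hc : done ++ a :: b :: t = (done ++ [a]) ++ b :: t := by simp
    rw [hl, hc, ih]
    simp [greedy, hab]

lemma mergeA_eq (cells : List Int) : mergeA cells = greedy cells := by
  match cells with
  | [] => simp [mergeA, greedy]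
  | [a] => simp [mergeA, greedy]
  | a :: b :: t =>
    rw [mergeA, if_neg (by simp)]
    simpa using mergeLoop_spec (a :: b :: t) []

-- B's scan with either possible state equals the greedy merge of the remaining nonzeros:
-- with just_merged = true the head is final; with just_merged = false the head v may still merge
lemma scan_aux : ∀ (n : Nat) (xs : List Int), xs.length ≤ n →
    (∀ rev, (xs.foldl scanStep (rev, true)).1
        = (greedy (xs.filter (· ≠ 0))).reverse ++ rev)
    ∧ (∀ rev v, v ≠ 0 → (xs.foldl scanStep (v :: rev, false)).1
        = (greedy (v :: xs.filter (· ≠ 0))).reverse ++ rev) := by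
  intro n
  induction n with
  | zero =>
    intro xs hxs
    have : xs = [] := List.eq_nil_of_length_eq_zero (Nat.le_zero.mp hxs)
    subst this
    constructor
    · intro rev; simp [greedy]
    · intro rev v hv; simp [greedy]
  | succ n ih =>
    intro xs hxs
    match xs with
    | [] =>
      constructor
      · intro rev; simp [greedy]
      · intro rev v hv; simp [greedy]
    | w :: u =>
      have hu : u.length ≤ n := by simpa using hxs
      constructor
      · intro rev
        by_cases hw : w = 0
        · subst hw
          simpa using (ih u hu).1 rev
        · have : scanStep (rev, true) w = (w :: rev, false) := by
            simp [scanStep, hw]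
          simp only [List.foldl_cons, this]
          rw [(ih u hu).2 rev w hw]
          simp [hw]
      · intro rev v hv
        by_cases hw : w = 0
        · subst hw
          simpa [hv] using (ih u hu).2 rev v hv
        · by_cases hvw : v = w
          · have : scanStep (v :: rev, false) w = (2 * w :: rev, true) := by
              simp [scanStep, hw, hvw]
            simp only [List.foldl_cons, this]
            rw [(ih u hu).1 (2 * w :: rev)]
            simp [greedy, hw, hvw]
          · have : scanStep (v :: rev, false) w = (w :: v :: rev, false) := by
              simp [scanStep, hw, hvw]
            simp only [List.foldl_cons, this]
            rw [(ih u hu).2 (v :: rev) w hw]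
            simp [greedy, hw, hvw]

lemma scan_zero (xs : List Int) :
    (xs.foldl scanStep ([], false)).1 = (greedy (xs.filter (· ≠ 0))).reverse := by
  induction xs with
  | nil => simp [greedy]
  | cons x u ih =>
    by_cases hx : x = 0
    · subst hx; simpa using ih
    · have : scanStep ([], false) x = ([x], false) := by simp [scanStep, hx]
      simp only [List.foldl_cons, this]
      have := (scan_aux u.length u le_rfl).2 [] x hx
      simp only [this]
      simp [hx]

-- A's collect loop builds exactly the nonzero column values, in order
lemma collect_eq (r : List Int) (g : List (List Int)) (j : Int) (acc : List Int) :
    r.foldl (collectStep g j) acc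
      = acc ++ ((r.map (fun i => getCell g i j)).filter (· ≠ 0)) := by
  have h := PySem.List.foldl_append_if (fun c : Int => decide (c ≠ 0)) (fun c : Int => c)
      (r.map (fun i => getCell g i j)) acc
  rw [List.foldl_map] at h
  have hs : collectStep g j
      = fun acc i => if getCell g i j = 0 then acc else acc ++ [getCell g i j] := by
    funext acc i
    simp [collectStep]
  rw [hs]
  simpa using h

-- popping the merged cells front-to-back writes the same values as zipping with the padded list
lemma popzip (j : Int) : ∀ (r cells : List Int) (m : Bool) (g : List (List Int)),
    (r.foldl (popWriteStep j) (cells, m, g)).2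
      = (r.zip (cells ++ List.replicate (r.length - cells.length) 0)).foldl
          (zipWriteStep j) (m, g) := by
  intro r
  induction r with
  | nil => intro cells m g; simp
  | cons i r' ih =>
    intro cells m g
    match cells with
    | [] =>
      simp only [List.length_cons, List.length_nil, Nat.sub_zero, List.nil_append,
        List.replicate_succ, List.zip_cons_cons, List.foldl_cons]
      rw [show popWriteStep j ([], m, g) i
            = ([], (if getCell g i j ≠ 0 then true else m), setCell g i j 0) from rfl]
      rw [show zipWriteStep j (m, g) (i, 0)
            = ((if getCell g i j ≠ 0 then true else m), setCell g i j 0) from rfl]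
      simpa using ih [] _ _
    | c :: cs =>
      simp only [List.cons_append, List.zip_cons_cons, List.foldl_cons, List.length_cons,
        Nat.succ_sub_succ]
      rw [show popWriteStep j (c :: cs, m, g) i
            = (cs, (if getCell g i j ≠ c then true else m), setCell g i j c) from rfl]
      rw [show zipWriteStep j (m, g) (i, c)
            = ((if getCell g i j ≠ c then true else m), setCell g i j c) from rfl]
      exact ih cs _ _

lemma colAB (r : List Int) (st : Bool × List (List Int)) (j : Int) (hr : r.length = 4) :
    colA r st j = colB r st j := by
  unfold colA colB
  dsimp only
  rw [List.foldl_map (f := fun i => getCell st.2 i j) (g := scanStep) (l := r)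
    (init := (([] : List Int), false)) |>.symm]
  rw [scan_zero, List.reverse_reverse]
  rw [collect_eq, List.nil_append, mergeA_eq]
  rw [popzip j r _ st.1 st.2]
  congr 1
  rw [hr]

lemma main_eq (down : Bool) (grid : List (List Int)) :
    moveUD down grid = moveUD_alt down grid := by
  unfold moveUD moveUD_alt
  dsimp only
  cases down with
  | false =>
    simp only [Bool.false_eq_true, if_false]
    rw [show colA (PySem.List.pyRange 0 4 1) = colB (PySem.List.pyRange 0 4 1) from
      funext fun st => funext fun j => colAB _ _ _ (by decide)]
  | true =>
    simp only [if_true]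
    rw [show PySem.List.pyRange (4 - 1) (-1) (-1) = PySem.List.pyRange 3 (-1) (-1) from by
      norm_num]
    rw [show colA (PySem.List.pyRange 3 (-1) (-1)) = colB (PySem.List.pyRange 3 (-1) (-1)) from
      funext fun st => funext fun j => colAB _ _ _ (by decide)]

-- ===== VERDICT (by name: the statement is the Claim_ definition above) =====
theorem moveUD_spec : Claim_equal_moveUD := by
  intro down grid _ _
  show moveUD down grid = moveUD_alt down grid
  exact main_eq down grid
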